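-- pv_equiv track=rewrite | github.com/Etienne-bdt/AOC25 | d9/main.py | is_rectangle_filled
-- ===== SOURCE A (Python) =====
-- def is_rectangle_filled(p1, p2, x_indices, y_indices, outside_pixels):
--     """Check if rectangle is fully inside (no outside pixels in compressed space)."""
--     x1_idx = x_indices[p1[0]]
--     x2_idx = x_indices[p2[0]]
--     y1_idx = y_indices[p1[1]]
--     y2_idx = y_indices[p2[1]]
--
--     min_x_idx = min(x1_idx, x2_idx)
--     max_x_idx = max(x1_idx, x2_idx)
--     min_y_idx = min(y1_idx, y2_idx)
--     max_y_idx = max(y1_idx, y2_idx)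
--
--     for x_idx in range(min_x_idx, max_x_idx + 1):
--         for y_idx in range(min_y_idx, max_y_idx + 1):
--             if (x_idx, y_idx) in outside_pixels:
--                 return False
--     return True
-- ===== SOURCE B (Python) =====
-- def _bounds(a, b):
--     """Ordered pair (lo, hi) without min/max."""
--     return (a, b) if a <= b else (b, a)
--
--
-- def _in_box(bx, by, q):
--     return bx[0] <= q[0] <= bx[1] and by[0] <= q[1] <= by[1]
--
--
-- def is_rectangle_filled(p1, p2, x_indices, y_indices, outside_pixels):
--     """Filled iff no outside pixel lies inside the rectangle's index box:
--     scan the sparse outside set, not the dense rectangle area."""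
--     bx = _bounds(x_indices[p1[0]], x_indices[p2[0]])
--     by = _bounds(y_indices[p1[1]], y_indices[p2[1]])
--     return all(not _in_box(bx, by, q) for q in outside_pixels)
-- ===== Notes on version B (the rewrite author's own statement) =====
-- stated objective: faster
-- what changed: Instead of enumerating every (x, y) cell of the rectangle and testing membership in outside_pixels, B computes the ordered bound pairs once and makes a single pass over outside_pixels, returning True iff no pixel lies inside the box.
import Mathlib
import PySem

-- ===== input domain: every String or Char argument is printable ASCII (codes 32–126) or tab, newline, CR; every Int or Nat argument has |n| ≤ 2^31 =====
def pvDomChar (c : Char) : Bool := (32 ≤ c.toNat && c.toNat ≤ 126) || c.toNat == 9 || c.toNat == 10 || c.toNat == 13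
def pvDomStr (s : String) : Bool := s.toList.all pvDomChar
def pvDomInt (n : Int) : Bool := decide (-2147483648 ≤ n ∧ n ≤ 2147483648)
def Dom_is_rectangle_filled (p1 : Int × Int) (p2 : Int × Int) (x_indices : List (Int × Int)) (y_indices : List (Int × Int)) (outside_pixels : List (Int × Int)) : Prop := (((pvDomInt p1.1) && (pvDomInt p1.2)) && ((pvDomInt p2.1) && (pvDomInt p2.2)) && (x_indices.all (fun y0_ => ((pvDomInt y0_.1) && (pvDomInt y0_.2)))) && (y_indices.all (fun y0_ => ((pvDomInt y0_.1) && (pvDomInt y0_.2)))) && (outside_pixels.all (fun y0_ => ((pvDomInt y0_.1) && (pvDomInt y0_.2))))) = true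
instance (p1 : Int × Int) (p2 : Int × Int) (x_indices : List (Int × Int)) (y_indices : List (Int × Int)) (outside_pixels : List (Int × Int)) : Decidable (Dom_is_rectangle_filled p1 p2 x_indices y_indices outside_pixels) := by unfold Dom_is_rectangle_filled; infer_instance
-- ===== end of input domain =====

-- B replaces A's dense double loop over every rectangle cell by computing the two
-- ordered bound pairs once and making one pass over the sparse outside_pixels set (faster).
-- ===== PORT A =====
-- dict[int,int] as association list: first-match lookup; total form used under Pre_ (key present)
def pvLookupD (d : List (Int × Int)) (k : Int) : Int := (d.lookup k).getD 0

def is_rectangle_filled (p1 : Int × Int) (p2 : Int × Int) (x_indices : List (Int × Int)) (y_indices : List (Int × Int)) (outside_pixels : List (Int × Int)) : Bool :=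
  let x1_idx := pvLookupD x_indices p1.1
  let x2_idx := pvLookupD x_indices p2.1
  let y1_idx := pvLookupD y_indices p1.2
  let y2_idx := pvLookupD y_indices p2.2
  let min_x_idx := min x1_idx x2_idx
  let max_x_idx := max x1_idx x2_idx
  let min_y_idx := min y1_idx y2_idx
  let max_y_idx := max y1_idx y2_idx
  -- 'for … return False … return True' = not (any …)
  !((PySem.List.pyRange min_x_idx (max_x_idx + 1) 1).any fun x_idx =>
      (PySem.List.pyRange min_y_idx (max_y_idx + 1) 1).any fun y_idx =>
        outside_pixels.contains (x_idx, y_idx))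

-- ===== PORT B =====
-- ordered pair (lo, hi) without min/max, as in Source B's _bounds
def pvBounds (a b : Int) : Int × Int := if a ≤ b then (a, b) else (b, a)

-- Source B's _in_box: the chained comparisons
def pvInBox (bx by_ q : Int × Int) : Bool :=
  decide (bx.1 ≤ q.1 ∧ q.1 ≤ bx.2 ∧ by_.1 ≤ q.2 ∧ q.2 ≤ by_.2)

def is_rectangle_filled_alt (p1 : Int × Int) (p2 : Int × Int) (x_indices : List (Int × Int)) (y_indices : List (Int × Int)) (outside_pixels : List (Int × Int)) : Bool :=
  let bx := pvBounds (pvLookupD x_indices p1.1) (pvLookupD x_indices p2.1)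
  let by_ := pvBounds (pvLookupD y_indices p1.2) (pvLookupD y_indices p2.2)
  outside_pixels.all fun q => !pvInBox bx by_ q

-- ===== PRECONDITION & SPEC =====
-- Pre_ excludes exactly the inputs where Python A raises KeyError: one of the four
-- coordinate keys missing from its compressed-index dict.
def Pre_is_rectangle_filled (p1 : Int × Int) (p2 : Int × Int) (x_indices : List (Int × Int)) (y_indices : List (Int × Int)) (outside_pixels : List (Int × Int)) : Prop :=
  (x_indices.lookup p1.1).isSome = true ∧ (x_indices.lookup p2.1).isSome = true ∧
  (y_indices.lookup p1.2).isSome = true ∧ (y_indices.lookup p2.2).isSome = true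
instance (p1 : Int × Int) (p2 : Int × Int) (x_indices : List (Int × Int)) (y_indices : List (Int × Int)) (outside_pixels : List (Int × Int)) : Decidable (Pre_is_rectangle_filled p1 p2 x_indices y_indices outside_pixels) := by unfold Pre_is_rectangle_filled; infer_instance

def pvWitness_is_rectangle_filled : (Int × Int) × (Int × Int) × (List (Int × Int)) × (List (Int × Int)) × (List (Int × Int)) :=
  ((0, 1), (2, 3), [(0, 0), (2, 1)], [(1, 0), (3, 2)], [(5, 5)])

def Spec_is_rectangle_filled (p1 : Int × Int) (p2 : Int × Int) (x_indices : List (Int × Int)) (y_indices : List (Int × Int)) (outside_pixels : List (Int × Int)) (out : Bool) : Prop := out = is_rectangle_filled_alt p1 p2 x_indices y_indices outside_pixels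
instance (p1 : Int × Int) (p2 : Int × Int) (x_indices : List (Int × Int)) (y_indices : List (Int × Int)) (outside_pixels : List (Int × Int)) (out : Bool) : Decidable (Spec_is_rectangle_filled p1 p2 x_indices y_indices outside_pixels out) := by unfold Spec_is_rectangle_filled; infer_instance

-- ===== CLAIM (what is proved, stated in full; the proofs are below) =====
def Claim_equal_is_rectangle_filled : Prop := ∀ (p1 : Int × Int) (p2 : Int × Int) (x_indices : List (Int × Int)) (y_indices : List (Int × Int)) (outside_pixels : List (Int × Int)), Dom_is_rectangle_filled p1 p2 x_indices y_indices outside_pixels → Pre_is_rectangle_filled p1 p2 x_indices y_indices outside_pixels → Spec_is_rectangle_filled p1 p2 x_indices y_indices outside_pixels (is_rectangle_filled p1 p2 x_indices y_indices outside_pixels)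

-- ===== LEMMAS AND PROOFS =====
-- the dense double scan over the box [a,b]×[c,d] finds an outside pixel
-- iff some pixel of the list lies in the box
theorem pvDense_eq_sparse (a b c d : Int) (out : List (Int × Int)) :
    ((PySem.List.pyRange a (b + 1) 1).any fun x =>
      (PySem.List.pyRange c (d + 1) 1).any fun y => out.contains (x, y))
    = (out.any fun q => pvInBox (a, b) (c, d) q) := by
  rw [Bool.eq_iff_iff]
  simp only [List.any_eq_true, PySem.List.mem_pyRange_one, List.contains_iff_mem,
    pvInBox, decide_eq_true_eq]
  constructor
  · rintro ⟨x, ⟨hx1, hx2⟩, y, ⟨hy1, hy2⟩, hmem⟩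
    exact ⟨(x, y), hmem, hx1, by omega, hy1, by omega⟩
  · rintro ⟨q, hmem, h1, h2, h3, h4⟩
    exact ⟨q.1, ⟨h1, by omega⟩, q.2, ⟨h3, by omega⟩, hmem⟩

-- B's ordered pair equals (min, max)
theorem pvBounds_eq (a b : Int) : pvBounds a b = (min a b, max a b) := by
  unfold pvBounds; split_ifs with h <;> simp <;> omega

-- ===== VERDICT (by name: the statement is the Claim_ definition above) =====
theorem is_rectangle_filled_spec : Claim_equal_is_rectangle_filled := by
  intro p1 p2 xi yi out _ _
  simp only [Spec_is_rectangle_filled, is_rectangle_filled, is_rectangle_filled_alt,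
    pvBounds_eq, pvDense_eq_sparse, List.all_eq_not_any_not, Bool.not_not]
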